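-- pv_equiv track=rewrite | github.com/algo-itzy/algo-itzy | Programmers/표_편집/표_편집-yeonhee.py | solution
-- ===== SOURCE A (Python) =====
-- def solution(n, k, cmds):
--     answer = ['O'] * n
--     linked_list = {i: [i-1, i+1] for i in range(1, n+1)}
--     stack = []
--
--     k += 1
--
--     for cmd in cmds:
--         cmd = cmd.split(' ')
--         if cmd[0] == 'U':
--             for _ in range(int(cmd[1])):
--                 k = linked_list[k][0]
--
--         elif cmd[0] == 'D':
--             for _ in range(int(cmd[1])):
--                 k = linked_list[k][1]
--
--         elif cmd[0] == 'C':
--             up, down = linked_list[k]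
--             stack.append([up, down, k])
--             answer[k-1] = 'X'
--             if down == n+1:
--                 k = linked_list[k][0]
--             else:
--                 k = linked_list[k][1]
--
--             if up == 0:  # Head일 경우
--                 linked_list[down][0] = up
--             elif down == n+1:  # Tail일 경우
--                 linked_list[up][1] = down
--             else:
--                 linked_list[up][1] = down
--                 linked_list[down][0] = up
--
--         elif cmd[0] == 'Z':
--             up, down, now = stack.pop()
--             answer[now-1] = 'O'
--
--             if up == 0:
--                 linked_list[down][0] = now
--             elif down == n+1:
--                 linked_list[up][1] = now
--             else:
--                 linked_list[up][1] = now
--                 linked_list[down][0] = now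
--
--     return ''.join(answer)
-- ===== SOURCE B (Python) =====
-- def solution(n, k, cmds):
--     # deleted rows, most recent last: doubles as the dead set and the undo stack
--     stack = []
--     k += 1
--     for cmd in cmds:
--         parts = cmd.split(' ')
--         op = parts[0]
--         if op == 'U':
--             for _ in range(int(parts[1])):
--                 k -= 1
--                 while k in stack:
--                     k -= 1
--         elif op == 'D':
--             for _ in range(int(parts[1])):
--                 k += 1
--                 while k in stack:
--                     k += 1
--         elif op == 'C':
--             j = k + 1
--             while j in stack:
--                 j += 1
--             i = k - 1
--             while i in stack:
--                 i -= 1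
--             stack.append(k)
--             k = i if j == n + 1 else j
--         elif op == 'Z':
--             stack.pop()
--     return ''.join('X' if i in stack else 'O' for i in range(1, n + 1))
-- ===== Notes on version B (the rewrite author's own statement) =====
-- stated objective: simpler
-- what changed: B drops A's doubly-linked-list dict, the up/down pointer surgery and the mutable answer array entirely: it keeps only the stack of deleted rows (which is simultaneously the dead set), moves the cursor by stepping and skipping dead rows via membership tests, restores by a bare pop, and renders the O/X string once at the end.
import Mathlib
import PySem

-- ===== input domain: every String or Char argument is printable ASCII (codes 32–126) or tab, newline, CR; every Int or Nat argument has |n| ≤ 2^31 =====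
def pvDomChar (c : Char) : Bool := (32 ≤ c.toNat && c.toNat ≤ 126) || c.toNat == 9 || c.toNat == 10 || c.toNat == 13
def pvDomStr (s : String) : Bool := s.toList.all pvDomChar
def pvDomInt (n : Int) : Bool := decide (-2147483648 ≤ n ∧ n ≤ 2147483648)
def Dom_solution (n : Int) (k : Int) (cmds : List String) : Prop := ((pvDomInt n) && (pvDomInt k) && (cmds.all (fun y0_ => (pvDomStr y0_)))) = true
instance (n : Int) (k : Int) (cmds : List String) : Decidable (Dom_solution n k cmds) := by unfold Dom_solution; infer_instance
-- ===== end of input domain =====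

-- B replaces A's doubly-linked-list dict by the bare stack of deleted rows (used both as the
-- dead set and as the undo stack); the equivalence below is about the RETURN value (A mutates
-- nothing observable). Objective: simpler.

-- ===== PORT A =====
def solStepA (n : Int) (s : List String × PySem.Dict Int (Int × Int) × List (Int × Int × Int) × Int)
    (cmd : String) : List String × PySem.Dict Int (Int × Int) × List (Int × Int × Int) × Int :=
  let ans := s.1
  let linked := s.2.1
  let stack := s.2.2.1
  let k := s.2.2.2
  let parts := (PySem.Str.split? cmd " ").getD []
  let p0 := (PySem.List.pyGet? parts 0).getD ""
  if p0 = "U" then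
    -- for _ in range(int(cmd[1])): k = linked_list[k][0]
    let x := (PySem.Int.ofStr? ((PySem.List.pyGet? parts 1).getD "")).getD 0
    let k' := (PySem.List.pyRange 0 x 1).foldl (fun kk _ => (linked.getD kk (0, 0)).1) k
    (ans, linked, stack, k')
  else if p0 = "D" then
    let x := (PySem.Int.ofStr? ((PySem.List.pyGet? parts 1).getD "")).getD 0
    let k' := (PySem.List.pyRange 0 x 1).foldl (fun kk _ => (linked.getD kk (0, 0)).2) k
    (ans, linked, stack, k')
  else if p0 = "C" then
    let ud := linked.getD k (0, 0)
    let up := ud.1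
    let down := ud.2
    let stack' := stack ++ [(up, down, k)]
    let ans' := PySem.List.pySetD ans (k - 1) "X"
    let k' := if down = n + 1 then (linked.getD k (0, 0)).1 else (linked.getD k (0, 0)).2
    let linked' :=
      if up = 0 then linked.modify down (0, 0) (fun p => (up, p.2))
      else if down = n + 1 then linked.modify up (0, 0) (fun p => (p.1, down))
      else (linked.modify up (0, 0) (fun p => (p.1, down))).modify down (0, 0) (fun p => (up, p.2))
    (ans', linked', stack', k')
  else if p0 = "Z" then
    let t := PySem.List.pyGetD stack (-1) (0, 0, 0)  -- stack.pop() (value)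
    let stack' := stack.dropLast                      -- stack.pop() (removal)
    let up := t.1
    let down := t.2.1
    let now := t.2.2
    let ans' := PySem.List.pySetD ans (now - 1) "O"
    let linked' :=
      if up = 0 then linked.modify down (0, 0) (fun p => (now, p.2))
      else if down = n + 1 then linked.modify up (0, 0) (fun p => (p.1, now))
      else (linked.modify up (0, 0) (fun p => (p.1, now))).modify down (0, 0) (fun p => (now, p.2))
    (ans', linked', stack', k)
  else
    (ans, linked, stack, k)

def solution (n : Int) (k : Int) (cmds : List String) : String :=
  let ans0 := PySem.List.pyRepeat ["O"] n
  let linked0 := (PySem.List.pyRange 1 (n + 1) 1).foldl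
    (fun d i => d.insert i (i - 1, i + 1)) PySem.Dict.empty
  let s := cmds.foldl (solStepA n) (ans0, linked0, [], k + 1)
  PySem.Str.join "" s.1

-- ===== PORT B =====
-- the two skip-dead while loops of Source B; a run of consecutive dead rows has at most
-- st.length members, so st.length steps of structural fuel always suffice (value unchanged)
def skipUpF (st : List Int) : Nat → Int → Int
  | 0, j => j
  | f + 1, j => if j ∈ st then skipUpF st f (j - 1) else j

def skipUp (st : List Int) (j : Int) : Int := skipUpF st st.length j

def skipDnF (st : List Int) : Nat → Int → Int
  | 0, j => j
  | f + 1, j => if j ∈ st then skipDnF st f (j + 1) else j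

def skipDn (st : List Int) (j : Int) : Int := skipDnF st st.length j

def solStepB (n : Int) (s : List Int × Int) (cmd : String) : List Int × Int :=
  let st := s.1
  let k := s.2
  let parts := (PySem.Str.split? cmd " ").getD []
  let p0 := (PySem.List.pyGet? parts 0).getD ""
  if p0 = "U" then
    let x := (PySem.Int.ofStr? ((PySem.List.pyGet? parts 1).getD "")).getD 0
    (st, (PySem.List.pyRange 0 x 1).foldl (fun kk _ => skipUp st (kk - 1)) k)
  else if p0 = "D" then
    let x := (PySem.Int.ofStr? ((PySem.List.pyGet? parts 1).getD "")).getD 0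
    (st, (PySem.List.pyRange 0 x 1).foldl (fun kk _ => skipDn st (kk + 1)) k)
  else if p0 = "C" then
    let j := skipDn st (k + 1)
    let i := skipUp st (k - 1)
    (st ++ [k], if j = n + 1 then i else j)
  else if p0 = "Z" then
    (st.dropLast, k)
  else
    (st, k)

def solution_alt (n : Int) (k : Int) (cmds : List String) : String :=
  let s := cmds.foldl (solStepB n) (([] : List Int), k + 1)
  PySem.Str.join "" ((PySem.List.pyRange 1 (n + 1) 1).map (fun i => if i ∈ s.1 then "X" else "O"))

-- ===== PRECONDITION & SPEC =====
-- parse shape of one command, exactly as both ports read it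
def pvParts (c : String) : List String := (PySem.Str.split? c " ").getD []
def pvP0 (c : String) : String := (PySem.List.pyGet? (pvParts c) 0).getD ""
def pvP1 (c : String) : String := (PySem.List.pyGet? (pvParts c) 1).getD ""

inductive PvOp where
  | U (x : Int) | D (x : Int) | C | Z | N | Bad
  deriving DecidableEq, Repr

def pvOp (c : String) : PvOp :=
  if pvP0 c = "U" then
    match PySem.Int.ofStr? (pvP1 c) with
    | some x => .U x
    | none => .Bad
  else if pvP0 c = "D" then
    match PySem.Int.ofStr? (pvP1 c) with
    | some x => .D x
    | none => .Bad
  else if pvP0 c = "C" then .C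
  else if pvP0 c = "Z" then .Z
  else .N

-- the nearest not-deleted row at or below j (0 if none), and at or above j (n+1 if none):
-- the last / first element of the not-deleted rows of the closed range, purely by filtering
def pvPrevAlive (dead : List Int) (j : Int) : Int :=
  ((PySem.List.pyRange 0 (j + 1) 1).filter (fun x => !decide (x ∈ dead))).getLastD 0

def pvNextAlive (n : Int) (dead : List Int) (j : Int) : Int :=
  ((PySem.List.pyRange j (n + 2) 1).filter (fun x => !decide (x ∈ dead))).headD (n + 1)

-- x cursor-up steps from k with dead set `dead` (one entry per iteration of A's own
-- range(x) loop): the resulting cursor, or none as soon as one step would read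
-- linked_list[k] with k not a table row (Python's KeyError)
def pvUp? (n : Int) (dead : List Int) : Nat → Int → Option Int
  | 0, k => some k
  | j + 1, k => if 1 ≤ k ∧ k ≤ n ∧ k ∉ dead then pvUp? n dead j (pvPrevAlive dead (k - 1)) else none

def pvDn? (n : Int) (dead : List Int) : Nat → Int → Option Int
  | 0, k => some k
  | j + 1, k => if 1 ≤ k ∧ k ≤ n ∧ k ∉ dead then pvDn? n dead j (pvNextAlive n dead (k + 1)) else none

-- Exact per-command applicability scan of the script: true iff no command raises — a malformed
-- 'U'/'D' argument (IndexError/ValueError of int(cmd[1])), a cursor step or 'C' off the table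
-- (KeyError on the linked-list dict, including 'C' on the last alive row), or 'Z' with nothing
-- deleted (IndexError of pop).  This is the validity the original problem statement guarantees.
def pvOK (n : Int) : Int → List Int → List String → Bool
  | _, _, [] => true
  | k, dead, c :: rest =>
    match pvOp c with
    | .U x => match pvUp? n dead x.toNat k with
              | some k' => pvOK n k' dead rest
              | none => false
    | .D x => match pvDn? n dead x.toNat k with
              | some k' => pvOK n k' dead rest
              | none => false
    | .C => if 1 ≤ k ∧ k ≤ n ∧ k ∉ dead then
              (if pvPrevAlive dead (k - 1) = 0 ∧ pvNextAlive n dead (k + 1) = n + 1 then false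
               else pvOK n (if pvNextAlive n dead (k + 1) = n + 1 then pvPrevAlive dead (k - 1) else pvNextAlive n dead (k + 1))
                      (dead ++ [k]) rest)
            else false
    | .Z => match dead.isEmpty with
            | true => false
            | false => pvOK n k dead.dropLast rest
    | .N => pvOK n k dead rest
    | .Bad => false

-- Pre_ excludes exactly the inputs on which the Python A raises (ValueError/IndexError on a
-- malformed 'U'/'D' argument, KeyError from moving the cursor off the table or from 'C' when no
-- alive neighbour exists, IndexError from 'Z' with no prior delete); on every input where A
-- returns, Pre_ holds.
def Pre_solution (n : Int) (k : Int) (cmds : List String) : Prop :=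
  pvOK n (k + 1) [] cmds = true

instance (n : Int) (k : Int) (cmds : List String) : Decidable (Pre_solution n k cmds) := by
  unfold Pre_solution; infer_instance

def pvWitness_solution : Int × Int × List String := (20, 9, ["D 2", "C", "U 3", "C", "Z", "Z"])

def Spec_solution (n : Int) (k : Int) (cmds : List String) (out : String) : Prop := out = solution_alt n k cmds
instance (n : Int) (k : Int) (cmds : List String) (out : String) : Decidable (Spec_solution n k cmds out) := by unfold Spec_solution; infer_instance

-- ===== CLAIM (what is proved, stated in full; the proofs are below) =====
def Claim_equal_solution : Prop := ∀ (n : Int) (k : Int) (cmds : List String), Dom_solution n k cmds → Pre_solution n k cmds → Spec_solution n k cmds (solution n k cmds)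

-- ===== LEMMAS AND PROOFS =====

-- well-founded twins of the fuel-bounded skip functions, used only in the proofs below

lemma pvFilterMono (p q : Int → Bool) (u : List Int) (h : ∀ x, p x = true → q x = true) :
    (u.filter p).length ≤ (u.filter q).length := by
  induction u with
  | nil => simp
  | cons a t ih =>
    simp only [List.filter_cons]
    cases hpa : p a with
    | false =>
      cases hqa : q a with
      | false => simp only [Bool.false_eq_true, if_false]; exact ih
      | true => simp only [Bool.false_eq_true, if_false, if_true, List.length_cons]; omega
    | true =>
      rw [h a hpa]
      simp only [if_true, List.length_cons]
      omega

lemma pvFilterLeLt (st : List Int) (j : Int) (h : j ∈ st) :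
    (st.filter (fun x => decide (x ≤ j - 1))).length < (st.filter (fun x => decide (x ≤ j))).length := by
  induction st with
  | nil => cases h
  | cons a t ih =>
    simp only [List.filter_cons]
    by_cases haj : a = j
    · subst haj
      rw [if_neg (by simp), if_pos (by simp)]
      have := pvFilterMono (fun x => decide (x ≤ a - 1)) (fun x => decide (x ≤ a)) t
        (fun x hx => by simp at hx ⊢; omega)
      simp only [List.length_cons]
      omega
    · have ht : j ∈ t := by
        rcases List.mem_cons.mp h with h' | h'
        · exact absurd h'.symm haj
        · exact h'
      have := ih ht
      by_cases hc : a ≤ j - 1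
      · rw [if_pos (by simpa using hc), if_pos (by simp; omega)]
        simp only [List.length_cons]; omega
      · by_cases hc2 : a ≤ j
        · rw [if_neg (by simpa using hc), if_pos (by simpa using hc2)]
          simp only [List.length_cons]; omega
        · rw [if_neg (by simpa using hc), if_neg (by simpa using hc2)]
          exact this

lemma pvFilterGeLt (st : List Int) (j : Int) (h : j ∈ st) :
    (st.filter (fun x => decide (j + 1 ≤ x))).length < (st.filter (fun x => decide (j ≤ x))).length := by
  induction st with
  | nil => cases h
  | cons a t ih =>
    simp only [List.filter_cons]
    by_cases haj : a = j
    · subst haj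
      rw [if_neg (by simp), if_pos (by simp)]
      have := pvFilterMono (fun x => decide (a + 1 ≤ x)) (fun x => decide (a ≤ x)) t
        (fun x hx => by simp at hx ⊢; omega)
      simp only [List.length_cons]
      omega
    · have ht : j ∈ t := by
        rcases List.mem_cons.mp h with h' | h'
        · exact absurd h'.symm haj
        · exact h'
      have := ih ht
      by_cases hc : j + 1 ≤ a
      · rw [if_pos (by simpa using hc), if_pos (by simp; omega)]
        simp only [List.length_cons]; omega
      · by_cases hc2 : j ≤ a
        · rw [if_neg (by simpa using hc), if_pos (by simpa using hc2)]
          simp only [List.length_cons]; omega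
        · rw [if_neg (by simpa using hc), if_neg (by simpa using hc2)]
          exact this

def skipUpW (st : List Int) (j : Int) : Int :=
  if h : j ∈ st then skipUpW st (j - 1) else j
termination_by (st.filter (fun x => decide (x ≤ j))).length
decreasing_by exact pvFilterLeLt st j h

def skipDnW (st : List Int) (j : Int) : Int :=
  if h : j ∈ st then skipDnW st (j + 1) else j
termination_by (st.filter (fun x => decide (j ≤ x))).length
decreasing_by exact pvFilterGeLt st j h

lemma skipUpW_not_mem {st : List Int} {j : Int} (h : j ∉ st) : skipUpW st j = j := by
  rw [skipUpW]; simp [h]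

lemma skipUpW_mem {st : List Int} {j : Int} (h : j ∈ st) : skipUpW st j = skipUpW st (j - 1) := by
  rw [skipUpW]; simp [h]

lemma skipDnW_not_mem {st : List Int} {j : Int} (h : j ∉ st) : skipDnW st j = j := by
  rw [skipDnW]; simp [h]

lemma skipDnW_mem {st : List Int} {j : Int} (h : j ∈ st) : skipDnW st j = skipDnW st (j + 1) := by
  rw [skipDnW]; simp [h]

lemma skipUpW_spec (st : List Int) (j : Int) :
    skipUpW st j ≤ j ∧ skipUpW st j ∉ st ∧ ∀ x, skipUpW st j < x → x ≤ j → x ∈ st := by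
  induction j using skipUpW.induct (st := st) with
  | case1 j h ih =>
    rw [skipUpW_mem h]
    refine ⟨by omega, ih.2.1, ?_⟩
    intro x h1 h2
    rcases eq_or_lt_of_le h2 with rfl | hlt
    · exact h
    · exact ih.2.2 x h1 (by omega)
  | case2 j h =>
    rw [skipUpW_not_mem h]
    exact ⟨le_refl _, h, fun x h1 h2 => absurd (lt_of_lt_of_le h1 h2) (lt_irrefl _)⟩

lemma skipDnW_spec (st : List Int) (j : Int) :
    j ≤ skipDnW st j ∧ skipDnW st j ∉ st ∧ ∀ x, j ≤ x → x < skipDnW st j → x ∈ st := by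
  induction j using skipDnW.induct (st := st) with
  | case1 j h ih =>
    rw [skipDnW_mem h]
    refine ⟨by omega, ih.2.1, ?_⟩
    intro x h1 h2
    rcases eq_or_lt_of_le h1 with rfl | hlt
    · exact h
    · exact ih.2.2 x (by omega) h2
  | case2 j h =>
    rw [skipDnW_not_mem h]
    exact ⟨le_refl _, h, fun x h1 h2 => absurd (lt_of_le_of_lt h1 h2) (lt_irrefl _)⟩

-- a run of consecutive integers all lying in st has at most st.length members
lemma pvRunBoundUp (st : List Int) (j r : Int) (hjr : r ≤ j)
    (hall : ∀ x, r < x → x ≤ j → x ∈ st) : (j - r).toNat ≤ st.length := by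
  have hsub : PySem.List.pyRange (r + 1) (j + 1) 1 ⊆ st := by
    intro x hx
    rw [PySem.List.mem_pyRange_one] at hx
    exact hall x (by omega) (by omega)
  have hnd := PySem.List.nodup_pyRange_one (a := r + 1) (b := j + 1)
  have := (List.subperm_of_subset hnd hsub).length_le
  rw [PySem.List.length_pyRange_one] at this
  omega

lemma pvRunBoundDn (st : List Int) (j r : Int) (hjr : j ≤ r)
    (hall : ∀ x, j ≤ x → x < r → x ∈ st) : (r - j).toNat ≤ st.length := by
  have hsub : PySem.List.pyRange j r 1 ⊆ st := by
    intro x hx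
    rw [PySem.List.mem_pyRange_one] at hx
    exact hall x hx.1 hx.2
  have hnd := PySem.List.nodup_pyRange_one (a := j) (b := r)
  have := (List.subperm_of_subset hnd hsub).length_le
  rw [PySem.List.length_pyRange_one] at this
  omega

lemma skipUpF_eq_of {st : List Int} {j r : Int} {f : Nat} (hj : r ≤ j) (hr : r ∉ st)
    (hall : ∀ x, r < x → x ≤ j → x ∈ st) (hf : (j - r).toNat ≤ f) : skipUpF st f j = r := by
  induction f generalizing j with
  | zero =>
    have : j = r := by omega
    simp [skipUpF, this]
  | succ f ih =>
    by_cases hjr : j = r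
    · subst hjr
      simp [skipUpF, hr]
    · have hmem : j ∈ st := hall j (by omega) (le_refl j)
      simp only [skipUpF, if_pos hmem]
      exact ih (by omega) (fun x h1 h2 => hall x h1 (by omega)) (by omega)

lemma skipDnF_eq_of {st : List Int} {j r : Int} {f : Nat} (hj : j ≤ r) (hr : r ∉ st)
    (hall : ∀ x, j ≤ x → x < r → x ∈ st) (hf : (r - j).toNat ≤ f) : skipDnF st f j = r := by
  induction f generalizing j with
  | zero =>
    have : j = r := by omega
    simp [skipDnF, this]
  | succ f ih =>
    by_cases hjr : j = r
    · subst hjr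
      simp [skipDnF, hr]
    · have hmem : j ∈ st := hall j (le_refl j) (by omega)
      simp only [skipDnF, if_pos hmem]
      exact ih (by omega) (fun x h1 h2 => hall x (by omega) h2) (by omega)

lemma skipUp_eq_of {st : List Int} {j r : Int} (hj : r ≤ j) (hr : r ∉ st)
    (hall : ∀ x, r < x → x ≤ j → x ∈ st) : skipUp st j = r :=
  skipUpF_eq_of hj hr hall (pvRunBoundUp st j r hj hall)

lemma skipDn_eq_of {st : List Int} {j r : Int} (hj : j ≤ r) (hr : r ∉ st)
    (hall : ∀ x, j ≤ x → x < r → x ∈ st) : skipDn st j = r :=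
  skipDnF_eq_of hj hr hall (pvRunBoundDn st j r hj hall)

lemma skipUp_eq_W (st : List Int) (j : Int) : skipUp st j = skipUpW st j := by
  have h := skipUpW_spec st j
  exact skipUp_eq_of h.1 h.2.1 h.2.2

lemma skipDn_eq_W (st : List Int) (j : Int) : skipDn st j = skipDnW st j := by
  have h := skipDnW_spec st j
  exact skipDn_eq_of h.1 h.2.1 h.2.2

lemma skipUp_spec (st : List Int) (j : Int) :
    skipUp st j ≤ j ∧ skipUp st j ∉ st ∧ ∀ x, skipUp st j < x → x ≤ j → x ∈ st := by
  rw [skipUp_eq_W]; exact skipUpW_spec st j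

lemma skipDn_spec (st : List Int) (j : Int) :
    j ≤ skipDn st j ∧ skipDn st j ∉ st ∧ ∀ x, j ≤ x → x < skipDn st j → x ∈ st := by
  rw [skipDn_eq_W]; exact skipDnW_spec st j

lemma skipUp_not_mem {st : List Int} {j : Int} (h : j ∉ st) : skipUp st j = j := by
  rw [skipUp_eq_W]; exact skipUpW_not_mem h

lemma skipDn_not_mem {st : List Int} {j : Int} (h : j ∉ st) : skipDn st j = j := by
  rw [skipDn_eq_W]; exact skipDnW_not_mem h

lemma pvPrevAlive_eq (dead : List Int) (j : Int) (h0 : 0 ≤ j) (hb : ∀ m ∈ dead, 1 ≤ m) :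
    pvPrevAlive dead j = skipUp dead j := by
  obtain ⟨hle, hnm, hall⟩ := skipUp_spec dead j
  have hr0 : 0 ≤ skipUp dead j := by
    by_contra hc
    push_neg at hc
    have := hb 0 (hall 0 (by omega) h0)
    omega
  unfold pvPrevAlive
  rw [PySem.List.pyRange_one_append 0 (skipUp dead j + 1) (j + 1) (by omega) (by omega),
    List.filter_append]
  have h2 : (PySem.List.pyRange (skipUp dead j + 1) (j + 1) 1).filter (fun x => !decide (x ∈ dead)) = [] := by
    rw [List.filter_eq_nil_iff]
    intro a ha
    rw [PySem.List.mem_pyRange_one] at ha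
    have := hall a (by omega) (by omega)
    simp [this]
  rw [h2, List.append_nil, PySem.List.pyRange_one_succ_right (by omega : (0:Int) ≤ skipUp dead j),
    List.filter_append]
  have h3 : [skipUp dead j].filter (fun x => !decide (x ∈ dead)) = [skipUp dead j] := by
    simp [hnm]
  rw [h3]
  simp

lemma pvNextAlive_eq (n : Int) (dead : List Int) (j : Int) (hj : j ≤ n + 1) (hb : ∀ m ∈ dead, m ≤ n) :
    pvNextAlive n dead j = skipDn dead j := by
  obtain ⟨hle, hnm, hall⟩ := skipDn_spec dead j
  have hrn : skipDn dead j ≤ n + 1 := by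
    by_contra hc
    push_neg at hc
    have := hb (n + 1) (hall (n + 1) (by omega) (by omega))
    omega
  unfold pvNextAlive
  rw [PySem.List.pyRange_one_append j (skipDn dead j) (n + 2) hle (by omega),
    List.filter_append]
  have h1 : (PySem.List.pyRange j (skipDn dead j) 1).filter (fun x => !decide (x ∈ dead)) = [] := by
    rw [List.filter_eq_nil_iff]
    intro a ha
    rw [PySem.List.mem_pyRange_one] at ha
    have := hall a ha.1 ha.2
    simp [this]
  rw [h1, List.nil_append, PySem.List.pyRange_one_cons (by omega : skipDn dead j < n + 2),
    List.filter_cons]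
  rw [if_pos (by simp [hnm])]
  simp

def pvRender (n : Int) (st : List Int) : List String :=
  (PySem.List.pyRange 1 (n + 1) 1).map (fun i => if i ∈ st then "X" else "O")

def pvRecon (dead : List Int) : List Int → List (Int × Int × Int)
  | [] => []
  | m :: rest => (skipUp dead (m - 1), skipDn dead (m + 1), m) :: pvRecon (dead ++ [m]) rest

lemma pvRecon_append (l : List Int) : ∀ (d : List Int) (m : Int),
    pvRecon d (l ++ [m]) = pvRecon d l ++ [(skipUp (d ++ l) (m - 1), skipDn (d ++ l) (m + 1), m)] := by
  induction l with
  | nil => intro d m; simp [pvRecon]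
  | cons a l ih =>
    intro d m
    simp only [List.cons_append, pvRecon, ih (d ++ [a]) m, List.append_assoc,
      List.cons_append, List.nil_append]

lemma pvRecon_mem : ∀ (l d : List Int) (t : Int × Int × Int), t ∈ pvRecon d l → t.2.2 ∈ l := by
  intro l
  induction l with
  | nil => intro d t h; cases h
  | cons a l ih =>
    intro d t h
    simp only [pvRecon, List.mem_cons] at h
    rcases h with rfl | h
    · simp
    · simp [ih (d ++ [a]) t h]

lemma pvRender_empty (n : Int) : PySem.List.pyRepeat ["O"] n = pvRender n [] := by
  rw [PySem.List.pyRepeat_singleton]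
  unfold pvRender
  simp only [List.not_mem_nil, if_false]
  rw [List.map_const']
  rw [PySem.List.length_pyRange_one]
  congr 1
  omega

lemma pvRender_set (n c : Int) (v : String) (f : Int → String) (h1 : 1 ≤ c) (h2 : c ≤ n) :
    PySem.List.pySetD ((PySem.List.pyRange 1 (n + 1) 1).map f) (c - 1) v =
      (PySem.List.pyRange 1 (n + 1) 1).map (fun i => if i = c then v else f i) := by
  rw [PySem.List.pySetD_of_nonneg ((PySem.List.pyRange 1 (n + 1) 1).map f) v (by omega : (0:Int) ≤ c - 1)]
  apply List.ext_getElem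
  · simp
  · intro i hi1 hi2
    simp only [List.length_set, List.length_map, PySem.List.length_pyRange_one] at hi1 hi2
    rw [List.getElem_set]
    simp only [List.getElem_map, PySem.List.getElem_pyRange_one]
    by_cases hc : (c - 1).toNat = i
    · rw [if_pos hc, if_pos (by omega)]
    · rw [if_neg hc, if_neg (by omega)]

lemma pvRender_C (n c : Int) (st : List Int) (h1 : 1 ≤ c) (h2 : c ≤ n) (hc : c ∉ st) :
    PySem.List.pySetD (pvRender n st) (c - 1) "X" = pvRender n (st ++ [c]) := by
  unfold pvRender
  rw [pvRender_set n c "X" _ h1 h2]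
  apply List.map_congr_left
  intro i _
  by_cases hic : i = c
  · subst hic; simp
  · simp [hic]

lemma pvRender_Z (n m : Int) (bs : List Int) (h1 : 1 ≤ m) (h2 : m ≤ n) (hm : m ∉ bs) :
    PySem.List.pySetD (pvRender n (bs ++ [m])) (m - 1) "O" = pvRender n bs := by
  unfold pvRender
  rw [pvRender_set n m "O" _ h1 h2]
  apply List.map_congr_left
  intro i _
  by_cases him : i = m
  · subst him; simp [hm]
  · simp [him]

-- the simulation relation between A's state and B's state
structure PvRel (n : Int) (ans : List String) (linked : PySem.Dict Int (Int × Int))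
    (stA : List (Int × Int × Int)) (kA : Int) (st : List Int) (kB : Int) : Prop where
  hk : kA = kB
  hnd : st.Nodup
  hbounds : ∀ m ∈ st, 1 ≤ m ∧ m ≤ n
  hans : ans = pvRender n st
  hstk : stA = pvRecon [] st
  hdead : ∀ t ∈ stA, linked.getD t.2.2 (0, 0) = (t.1, t.2.1)
  halive : ∀ i : Int, 1 ≤ i → i ≤ n → i ∉ st → linked.getD i (0, 0) = (skipUp st (i-1), skipDn st (i+1))

lemma pvInitAux (lo : Int) : ∀ (d : Nat) (hi i : Int), (hi - lo).toNat = d → lo ≤ i → i < hi →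
    ((PySem.List.pyRange lo hi 1).foldl (fun dd j => dd.insert j (j - 1, j + 1)) PySem.Dict.empty).getD i (0,0) = (i - 1, i + 1) := by
  intro d
  induction d with
  | zero =>
    intro hi i hd h1 h2
    exact absurd h2 (by omega)
  | succ d ih =>
    intro hi i hd h1 h2
    have hlo : lo ≤ hi - 1 := by omega
    have hsplit : PySem.List.pyRange lo hi 1 = PySem.List.pyRange lo ((hi - 1) + 1) 1 := by norm_num
    rw [hsplit, PySem.List.pyRange_one_succ_right hlo, List.foldl_append]
    simp only [List.foldl_cons, List.foldl_nil]
    by_cases hi1 : i = hi - 1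
    · rw [PySem.Dict.getD_insert, if_pos hi1, hi1]
    · rw [PySem.Dict.getD_insert, if_neg hi1]
      exact ih (hi - 1) i (by omega) h1 (by omega)

lemma pvInit_getD (n : Int) : ∀ (i : Int), 1 ≤ i → i ≤ n →
    ((PySem.List.pyRange 1 (n + 1) 1).foldl (fun d j => d.insert j (j - 1, j + 1)) PySem.Dict.empty).getD i (0,0) = (i - 1, i + 1) := by
  intro i h1 h2
  exact pvInitAux 1 ((n + 1 - 1).toNat) (n + 1) i rfl h1 (by omega)

lemma pvOp_U {c : String} {x : Int} (h : pvOp c = PvOp.U x) :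
    pvP0 c = "U" ∧ PySem.Int.ofStr? (pvP1 c) = some x := by
  unfold pvOp at h
  by_cases h1 : pvP0 c = "U"
  · rw [if_pos h1] at h
    cases hx : PySem.Int.ofStr? (pvP1 c) with
    | none => rw [hx] at h; cases h
    | some y => rw [hx] at h; injection h with hy; subst hy; exact ⟨h1, rfl⟩
  · rw [if_neg h1] at h
    by_cases h2 : pvP0 c = "D"
    · rw [if_pos h2] at h
      cases hx : PySem.Int.ofStr? (pvP1 c) <;> rw [hx] at h <;> cases h
    · rw [if_neg h2] at h
      by_cases h3 : pvP0 c = "C"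
      · rw [if_pos h3] at h; cases h
      · rw [if_neg h3] at h
        by_cases h4 : pvP0 c = "Z"
        · rw [if_pos h4] at h; cases h
        · rw [if_neg h4] at h; cases h

lemma pvOp_D {c : String} {x : Int} (h : pvOp c = PvOp.D x) :
    pvP0 c ≠ "U" ∧ pvP0 c = "D" ∧ PySem.Int.ofStr? (pvP1 c) = some x := by
  unfold pvOp at h
  by_cases h1 : pvP0 c = "U"
  · rw [if_pos h1] at h
    cases hx : PySem.Int.ofStr? (pvP1 c) <;> rw [hx] at h <;> cases h
  · rw [if_neg h1] at h
    by_cases h2 : pvP0 c = "D"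
    · rw [if_pos h2] at h
      cases hx : PySem.Int.ofStr? (pvP1 c) with
      | none => rw [hx] at h; cases h
      | some y => rw [hx] at h; injection h with hy; subst hy; exact ⟨h1, h2, rfl⟩
    · rw [if_neg h2] at h
      by_cases h3 : pvP0 c = "C"
      · rw [if_pos h3] at h; cases h
      · rw [if_neg h3] at h
        by_cases h4 : pvP0 c = "Z"
        · rw [if_pos h4] at h; cases h
        · rw [if_neg h4] at h; cases h

lemma pvOp_C {c : String} (h : pvOp c = PvOp.C) :
    pvP0 c ≠ "U" ∧ pvP0 c ≠ "D" ∧ pvP0 c = "C" := by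
  unfold pvOp at h
  by_cases h1 : pvP0 c = "U"
  · rw [if_pos h1] at h
    cases hx : PySem.Int.ofStr? (pvP1 c) <;> rw [hx] at h <;> cases h
  · rw [if_neg h1] at h
    by_cases h2 : pvP0 c = "D"
    · rw [if_pos h2] at h
      cases hx : PySem.Int.ofStr? (pvP1 c) <;> rw [hx] at h <;> cases h
    · rw [if_neg h2] at h
      by_cases h3 : pvP0 c = "C"
      · exact ⟨h1, h2, h3⟩
      · rw [if_neg h3] at h
        by_cases h4 : pvP0 c = "Z"
        · rw [if_pos h4] at h; cases h
        · rw [if_neg h4] at h; cases h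

lemma pvOp_Z {c : String} (h : pvOp c = PvOp.Z) :
    pvP0 c ≠ "U" ∧ pvP0 c ≠ "D" ∧ pvP0 c ≠ "C" ∧ pvP0 c = "Z" := by
  unfold pvOp at h
  by_cases h1 : pvP0 c = "U"
  · rw [if_pos h1] at h
    cases hx : PySem.Int.ofStr? (pvP1 c) <;> rw [hx] at h <;> cases h
  · rw [if_neg h1] at h
    by_cases h2 : pvP0 c = "D"
    · rw [if_pos h2] at h
      cases hx : PySem.Int.ofStr? (pvP1 c) <;> rw [hx] at h <;> cases h
    · rw [if_neg h2] at h
      by_cases h3 : pvP0 c = "C"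
      · rw [if_pos h3] at h; cases h
      · rw [if_neg h3] at h
        by_cases h4 : pvP0 c = "Z"
        · exact ⟨h1, h2, h3, h4⟩
        · rw [if_neg h4] at h; cases h

lemma pvOp_N {c : String} (h : pvOp c = PvOp.N) :
    pvP0 c ≠ "U" ∧ pvP0 c ≠ "D" ∧ pvP0 c ≠ "C" ∧ pvP0 c ≠ "Z" := by
  unfold pvOp at h
  by_cases h1 : pvP0 c = "U"
  · rw [if_pos h1] at h
    cases hx : PySem.Int.ofStr? (pvP1 c) <;> rw [hx] at h <;> cases h
  · rw [if_neg h1] at h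
    by_cases h2 : pvP0 c = "D"
    · rw [if_pos h2] at h
      cases hx : PySem.Int.ofStr? (pvP1 c) <;> rw [hx] at h <;> cases h
    · rw [if_neg h2] at h
      by_cases h3 : pvP0 c = "C"
      · rw [if_pos h3] at h; cases h
      · rw [if_neg h3] at h
        by_cases h4 : pvP0 c = "Z"
        · rw [if_pos h4] at h; cases h
        · exact ⟨h1, h2, h3, h4⟩

lemma pvStep_noop (n : Int) (c : String) (sA : List String × PySem.Dict Int (Int × Int) × List (Int × Int × Int) × Int)
    (sB : List Int × Int) (h0 : pvOp c = PvOp.N) :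
    solStepA n sA c = sA ∧ solStepB n sB c = sB := by
  obtain ⟨n1, n2, n3, n4⟩ := pvOp_N h0
  simp only [pvP0, pvParts] at n1 n2 n3 n4
  constructor
  · simp only [solStepA]
    rw [if_neg n1, if_neg n2, if_neg n3, if_neg n4]
  · simp only [solStepB]
    rw [if_neg n1, if_neg n2, if_neg n3, if_neg n4]

-- A's branching pointer surgery (head / tail / interior) agrees, on every table row 1..n, with
-- unconditionally rewriting both neighbour entries
lemma pvAgree (linked : PySem.Dict Int (Int × Int)) (n u d v1 v2 : Int) (hd2 : 2 ≤ d) :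
    ∀ i : Int, 1 ≤ i → i ≤ n →
    (if u = 0 then linked.modify d (0, 0) (fun p => (v1, p.2))
     else if d = n + 1 then linked.modify u (0, 0) (fun p => (p.1, v2))
     else (linked.modify u (0, 0) (fun p => (p.1, v2))).modify d (0, 0) (fun p => (v1, p.2))).getD i (0, 0)
    = ((linked.modify u (0, 0) (fun p => (p.1, v2))).modify d (0, 0) (fun p => (v1, p.2))).getD i (0, 0) := by
  intro i hi1 hi2
  by_cases hu0 : u = 0
  · rw [if_pos hu0]
    simp only [PySem.Dict.getD_modify]
    by_cases hid : i = d
    · rw [if_pos hid, if_pos hid, if_neg (show ¬ d = u by omega)]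
    · rw [if_neg hid, if_neg hid, if_neg (show ¬ i = u by omega)]
  · rw [if_neg hu0]
    by_cases hdn1 : d = n + 1
    · rw [if_pos hdn1]
      simp only [PySem.Dict.getD_modify]
      rw [if_neg (show ¬ i = d by omega)]
    · rw [if_neg hdn1]

-- chains of A's pointer steps and B's skip steps coincide and follow pvUp?/pvDn?
lemma pvChainU {β : Type} (n : Int) (st : List Int) (linked : PySem.Dict Int (Int × Int))
    (hb : ∀ m ∈ st, 1 ≤ m ∧ m ≤ n)
    (halive : ∀ i : Int, 1 ≤ i → i ≤ n → i ∉ st → linked.getD i (0,0) = (skipUp st (i-1), skipDn st (i+1))) :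
    ∀ (l : List β) (k k' : Int), pvUp? n st l.length k = some k' →
      l.foldl (fun kk _ => (linked.getD kk (0,0)).1) k = k' ∧
      l.foldl (fun kk _ => skipUp st (kk - 1)) k = k' := by
  intro l
  induction l with
  | nil =>
    intro k k' h
    simp only [List.length_nil, pvUp?, Option.some.injEq] at h
    exact ⟨h, h⟩
  | cons b l ih =>
    intro k k' h
    simp only [List.length_cons, pvUp?] at h
    by_cases hc : 1 ≤ k ∧ k ≤ n ∧ k ∉ st
    · rw [if_pos hc] at h
      obtain ⟨hk1, hk2, hkal⟩ := hc
      rw [pvPrevAlive_eq st (k - 1) (by omega) (fun m hm => (hb m hm).1)] at h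
      have hstep : (linked.getD k (0,0)).1 = skipUp st (k - 1) := by
        rw [halive k hk1 hk2 hkal]
      simp only [List.foldl_cons, hstep]
      exact ih (skipUp st (k - 1)) k' h
    · rw [if_neg hc] at h
      cases h

lemma pvChainD {β : Type} (n : Int) (st : List Int) (linked : PySem.Dict Int (Int × Int))
    (hb : ∀ m ∈ st, 1 ≤ m ∧ m ≤ n)
    (halive : ∀ i : Int, 1 ≤ i → i ≤ n → i ∉ st → linked.getD i (0,0) = (skipUp st (i-1), skipDn st (i+1))) :
    ∀ (l : List β) (k k' : Int), pvDn? n st l.length k = some k' →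
      l.foldl (fun kk _ => (linked.getD kk (0,0)).2) k = k' ∧
      l.foldl (fun kk _ => skipDn st (kk + 1)) k = k' := by
  intro l
  induction l with
  | nil =>
    intro k k' h
    simp only [List.length_nil, pvDn?, Option.some.injEq] at h
    exact ⟨h, h⟩
  | cons b l ih =>
    intro k k' h
    simp only [List.length_cons, pvDn?] at h
    by_cases hc : 1 ≤ k ∧ k ≤ n ∧ k ∉ st
    · rw [if_pos hc] at h
      obtain ⟨hk1, hk2, hkal⟩ := hc
      rw [pvNextAlive_eq n st (k + 1) (by omega) (fun m hm => (hb m hm).2)] at h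
      have hstep : (linked.getD k (0,0)).2 = skipDn st (k + 1) := by
        rw [halive k hk1 hk2 hkal]
      simp only [List.foldl_cons, hstep]
      exact ih (skipDn st (k + 1)) k' h
    · rw [if_neg hc] at h
      cases h

lemma pvOK_cons (n : Int) (k : Int) (dead : List Int) (c : String) (rest : List String) :
    pvOK n k dead (c :: rest) = (match pvOp c with
    | .U x => match pvUp? n dead x.toNat k with
              | some k' => pvOK n k' dead rest
              | none => false
    | .D x => match pvDn? n dead x.toNat k with
              | some k' => pvOK n k' dead rest
              | none => false
    | .C => if 1 ≤ k ∧ k ≤ n ∧ k ∉ dead then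
              (if pvPrevAlive dead (k - 1) = 0 ∧ pvNextAlive n dead (k + 1) = n + 1 then false
               else pvOK n (if pvNextAlive n dead (k + 1) = n + 1 then pvPrevAlive dead (k - 1) else pvNextAlive n dead (k + 1))
                      (dead ++ [k]) rest)
            else false
    | .Z => match dead.isEmpty with
            | true => false
            | false => pvOK n k dead.dropLast rest
    | .N => pvOK n k dead rest
    | .Bad => false) := rfl

lemma pvDictC (n : Int) (st : List Int) (linked : PySem.Dict Int (Int × Int)) (kB : Int)
    (hk1 : 1 ≤ kB) (hk2 : kB ≤ n)
    (halive : ∀ i : Int, 1 ≤ i → i ≤ n → i ∉ st → linked.getD i (0,0) = (skipUp st (i-1), skipDn st (i+1))) :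
    ∀ i : Int, 1 ≤ i → i ≤ n → i ∉ st ++ [kB] →
      ((linked.modify (skipUp st (kB-1)) (0,0) (fun p => (p.1, skipDn st (kB+1)))).modify
          (skipDn st (kB+1)) (0,0) (fun p => (skipUp st (kB-1), p.2))).getD i (0,0)
        = (skipUp (st ++ [kB]) (i-1), skipDn (st ++ [kB]) (i+1)) := by
  intro i hi1 hi2 hi3
  have hmem : ∀ x : Int, x ∈ st ++ [kB] ↔ (x ∈ st ∨ x = kB) := by
    intro x; simp [List.mem_append]
  rw [hmem] at hi3
  push_neg at hi3
  obtain ⟨hiM, hik⟩ := hi3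
  set up := skipUp st (kB - 1) with hup
  set dn := skipDn st (kB + 1) with hdn
  have hups := skipUp_spec st (kB - 1); rw [← hup] at hups
  have hdns := skipDn_spec st (kB + 1); rw [← hdn] at hdns
  have hkup : up ≤ kB - 1 := hups.1
  have hkdn : kB + 1 ≤ dn := hdns.1
  have hallup : ∀ x, up < x → x ≤ kB - 1 → x ∈ st := hups.2.2
  have halldn : ∀ x, kB + 1 ≤ x → x < dn → x ∈ st := hdns.2.2
  have hupmem : up ∉ st := hups.2.1
  have hdnmem : dn ∉ st := hdns.2.1
  by_cases hidn : i = dn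
  · subst hidn
    rw [PySem.Dict.getD_modify, if_pos rfl, PySem.Dict.getD_modify,
      if_neg (by omega : ¬ (dn : Int) = up)]
    rw [halive dn (by omega) hi2 hdnmem]
    have e1 : skipUp (st ++ [kB]) (dn - 1) = up := by
      apply skipUp_eq_of (by omega) (by rw [hmem]; push_neg; exact ⟨hupmem, by omega⟩)
      intro x hx1 hx2
      rw [hmem]
      by_cases hxk : x = kB
      · right; exact hxk
      · left
        by_cases hxlt : x ≤ kB - 1
        · exact hallup x hx1 hxlt
        · exact halldn x (by omega) (by omega)
    have e2 : skipDn (st ++ [kB]) (dn + 1) = skipDn st (dn + 1) := by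
      have hs := skipDn_spec st (dn + 1)
      apply skipDn_eq_of hs.1 (by rw [hmem]; push_neg; exact ⟨hs.2.1, by omega⟩)
      intro x hx1 hx2
      rw [hmem]; left; exact hs.2.2 x hx1 hx2
    rw [e1, e2]
  · rw [PySem.Dict.getD_modify, if_neg hidn]
    by_cases hiup : i = up
    · subst hiup
      rw [PySem.Dict.getD_modify, if_pos rfl]
      rw [halive up hi1 (by omega) hupmem]
      have e1 : skipUp (st ++ [kB]) (up - 1) = skipUp st (up - 1) := by
        have hs := skipUp_spec st (up - 1)
        apply skipUp_eq_of hs.1 (by rw [hmem]; push_neg; exact ⟨hs.2.1, by omega⟩)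
        intro x hx1 hx2
        rw [hmem]; left; exact hs.2.2 x hx1 hx2
      have e2 : skipDn (st ++ [kB]) (up + 1) = dn := by
        apply skipDn_eq_of (by omega) (by rw [hmem]; push_neg; exact ⟨hdnmem, by omega⟩)
        intro x hx1 hx2
        rw [hmem]
        by_cases hxk : x = kB
        · right; exact hxk
        · left
          by_cases hxlt : x ≤ kB - 1
          · exact hallup x (by omega) hxlt
          · exact halldn x (by omega) (by omega)
      rw [e1, e2]
    · rw [PySem.Dict.getD_modify, if_neg hiup]
      rw [halive i hi1 hi2 hiM]
      have htri : i < up ∨ dn < i := by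
        by_contra hcon
        push_neg at hcon
        by_cases hlt : i ≤ kB - 1
        · exact hiM (hallup i (by omega) hlt)
        · exact hiM (halldn i (by omega) (by omega))
      have hs1 := skipUp_spec st (i - 1)
      have hs2 := skipDn_spec st (i + 1)
      rcases htri with hlt | hgt
      · have hr2 : skipDn st (i + 1) ≤ up := by
          by_contra hc
          push_neg at hc
          exact hupmem (hs2.2.2 up (by omega) (by omega))
        have e1 : skipUp (st ++ [kB]) (i - 1) = skipUp st (i - 1) := by
          apply skipUp_eq_of hs1.1 (by rw [hmem]; push_neg; exact ⟨hs1.2.1, by omega⟩)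
          intro x hx1 hx2
          rw [hmem]; left; exact hs1.2.2 x hx1 hx2
        have e2 : skipDn (st ++ [kB]) (i + 1) = skipDn st (i + 1) := by
          apply skipDn_eq_of hs2.1 (by rw [hmem]; push_neg; exact ⟨hs2.2.1, by omega⟩)
          intro x hx1 hx2
          rw [hmem]; left; exact hs2.2.2 x hx1 hx2
        rw [e1, e2]
      · have hr1 : dn ≤ skipUp st (i - 1) := by
          by_contra hc
          push_neg at hc
          exact hdnmem (hs1.2.2 dn hc (by omega))
        have e1 : skipUp (st ++ [kB]) (i - 1) = skipUp st (i - 1) := by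
          apply skipUp_eq_of hs1.1 (by rw [hmem]; push_neg; exact ⟨hs1.2.1, by omega⟩)
          intro x hx1 hx2
          rw [hmem]; left; exact hs1.2.2 x hx1 hx2
        have e2 : skipDn (st ++ [kB]) (i + 1) = skipDn st (i + 1) := by
          apply skipDn_eq_of hs2.1 (by rw [hmem]; push_neg; exact ⟨hs2.2.1, by omega⟩)
          intro x hx1 hx2
          rw [hmem]; left; exact hs2.2.2 x hx1 hx2
        rw [e1, e2]

lemma pvDictZ (n : Int) (bs : List Int) (linked : PySem.Dict Int (Int × Int)) (m : Int)
    (hm : m ∉ bs) (hm1 : 1 ≤ m) (hm2 : m ≤ n)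
    (halive : ∀ i : Int, 1 ≤ i → i ≤ n → i ∉ bs ++ [m] →
      linked.getD i (0,0) = (skipUp (bs ++ [m]) (i-1), skipDn (bs ++ [m]) (i+1)))
    (hgetm : linked.getD m (0,0) = (skipUp bs (m-1), skipDn bs (m+1))) :
    ∀ i : Int, 1 ≤ i → i ≤ n → i ∉ bs →
      ((linked.modify (skipUp bs (m-1)) (0,0) (fun p => (p.1, m))).modify
          (skipDn bs (m+1)) (0,0) (fun p => (m, p.2))).getD i (0,0)
        = (skipUp bs (i-1), skipDn bs (i+1)) := by
  intro i hi1 hi2 hiM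
  have hmemA : ∀ x : Int, x ∈ bs ++ [m] ↔ (x ∈ bs ∨ x = m) := by
    intro x; simp [List.mem_append]
  set u := skipUp bs (m - 1) with hu
  set d := skipDn bs (m + 1) with hd
  have hus := skipUp_spec bs (m - 1); rw [← hu] at hus
  have hds := skipDn_spec bs (m + 1); rw [← hd] at hds
  have hum : u ≤ m - 1 := hus.1
  have hdm : m + 1 ≤ d := hds.1
  have humem : u ∉ bs := hus.2.1
  have hdmem : d ∉ bs := hds.2.1
  have hallu : ∀ x, u < x → x ≤ m - 1 → x ∈ bs := hus.2.2
  have halld : ∀ x, m + 1 ≤ x → x < d → x ∈ bs := hds.2.2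
  by_cases hid : i = d
  · subst hid
    rw [PySem.Dict.getD_modify, if_pos rfl, PySem.Dict.getD_modify,
      if_neg (by omega : ¬ (d : Int) = u)]
    rw [halive d (by omega) hi2 (by rw [hmemA]; push_neg; exact ⟨hdmem, by omega⟩)]
    have e1 : skipUp bs (d - 1) = m := by
      apply skipUp_eq_of (by omega) hm
      intro x hx1 hx2
      exact halld x (by omega) (by omega)
    have e2 : skipDn (bs ++ [m]) (d + 1) = skipDn bs (d + 1) := by
      have hs := skipDn_spec bs (d + 1)
      apply skipDn_eq_of hs.1 (by rw [hmemA]; push_neg; exact ⟨hs.2.1, by omega⟩)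
      intro x hx1 hx2
      rw [hmemA]; left; exact hs.2.2 x hx1 hx2
    rw [e2, e1]
  · rw [PySem.Dict.getD_modify, if_neg hid]
    by_cases hiu : i = u
    · subst hiu
      rw [PySem.Dict.getD_modify, if_pos rfl]
      rw [halive u hi1 (by omega) (by rw [hmemA]; push_neg; exact ⟨humem, by omega⟩)]
      have e1 : skipUp (bs ++ [m]) (u - 1) = skipUp bs (u - 1) := by
        have hs := skipUp_spec bs (u - 1)
        apply skipUp_eq_of hs.1 (by rw [hmemA]; push_neg; exact ⟨hs.2.1, by omega⟩)
        intro x hx1 hx2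
        rw [hmemA]; left; exact hs.2.2 x hx1 hx2
      have e2 : skipDn bs (u + 1) = m := by
        apply skipDn_eq_of (by omega) hm
        intro x hx1 hx2
        exact hallu x (by omega) (by omega)
      rw [e1, e2]
    · rw [PySem.Dict.getD_modify, if_neg hiu]
      by_cases him : i = m
      · subst him
        exact hgetm
      · rw [halive i hi1 hi2 (by rw [hmemA]; push_neg; exact ⟨hiM, him⟩)]
        have htri : i < u ∨ d < i := by
          by_contra hcon
          push_neg at hcon
          by_cases hlt : i ≤ m - 1
          · exact hiM (hallu i (by omega) hlt)
          · exact hiM (halld i (by omega) (by omega))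
        have hs1 := skipUp_spec bs (i - 1)
        have hs2 := skipDn_spec bs (i + 1)
        rcases htri with hlt | hgt
        · have hr2 : skipDn bs (i + 1) ≤ u := by
            by_contra hc
            push_neg at hc
            exact humem (hs2.2.2 u (by omega) (by omega))
          have e1 : skipUp (bs ++ [m]) (i - 1) = skipUp bs (i - 1) := by
            apply skipUp_eq_of hs1.1 (by rw [hmemA]; push_neg; exact ⟨hs1.2.1, by omega⟩)
            intro x hx1 hx2
            rw [hmemA]; left; exact hs1.2.2 x hx1 hx2
          have e2 : skipDn (bs ++ [m]) (i + 1) = skipDn bs (i + 1) := by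
            apply skipDn_eq_of hs2.1 (by rw [hmemA]; push_neg; exact ⟨hs2.2.1, by omega⟩)
            intro x hx1 hx2
            rw [hmemA]; left; exact hs2.2.2 x hx1 hx2
          rw [e1, e2]
        · have hr1 : d ≤ skipUp bs (i - 1) := by
            by_contra hc
            push_neg at hc
            exact hdmem (hs1.2.2 d hc (by omega))
          have e1 : skipUp (bs ++ [m]) (i - 1) = skipUp bs (i - 1) := by
            apply skipUp_eq_of hs1.1 (by rw [hmemA]; push_neg; exact ⟨hs1.2.1, by omega⟩)
            intro x hx1 hx2
            rw [hmemA]; left; exact hs1.2.2 x hx1 hx2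
          have e2 : skipDn (bs ++ [m]) (i + 1) = skipDn bs (i + 1) := by
            apply skipDn_eq_of hs2.1 (by rw [hmemA]; push_neg; exact ⟨hs2.2.1, by omega⟩)
            intro x hx1 hx2
            rw [hmemA]; left; exact hs2.2.2 x hx1 hx2
          rw [e1, e2]

theorem pvMain (cmds : List String) (n : Int) :
    ∀ (ans : List String) (linked : PySem.Dict Int (Int × Int)) (stA : List (Int × Int × Int))
      (kA : Int) (st : List Int) (kB : Int),
      PvRel n ans linked stA kA st kB →
      pvOK n kB st cmds = true →
      (cmds.foldl (solStepA n) (ans, linked, stA, kA)).1 =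
        (PySem.List.pyRange 1 (n + 1) 1).map
          (fun i => if i ∈ (cmds.foldl (solStepB n) (st, kB)).1 then "X" else "O") := by
  induction cmds with
  | nil =>
    intro ans linked stA kA st kB hrel _
    exact hrel.hans
  | cons c rest ih =>
    intro ans linked stA kA st kB hrel hV
    rw [pvOK_cons] at hV
    simp only [List.foldl_cons]
    cases hop : pvOp c with
    | Bad => simp [hop] at hV
    | N =>
      simp only [hop] at hV
      obtain ⟨hA, hB⟩ := pvStep_noop n c (ans, linked, stA, kA) (st, kB) hop
      rw [hA]; simp only [hB]
      exact ih ans linked stA kA st kB hrel hV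
    | U x =>
      simp only [hop] at hV
      cases hstep : pvUp? n st x.toNat kB with
      | none => rw [hstep] at hV; cases hV
      | some k' =>
        rw [hstep] at hV
        obtain ⟨h1, hof⟩ := pvOp_U hop
        simp only [pvP0, pvParts] at h1
        simp only [pvP1, pvParts] at hof
        have hlen : (PySem.List.pyRange 0 x 1).length = x.toNat := by
          rw [PySem.List.length_pyRange_one]; omega
        have hch := pvChainU n st linked hrel.hbounds hrel.halive (PySem.List.pyRange 0 x 1) kB k'
          (by rw [hlen]; exact hstep)
        have hstepA : solStepA n (ans, linked, stA, kA) c =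
            (ans, linked, stA,
             (PySem.List.pyRange 0 x 1).foldl (fun kk _ => (linked.getD kk (0,0)).1) kB) := by
          simp only [solStepA]
          rw [if_pos h1, hof, hrel.hk]
          simp only [Option.getD_some]
        have hstepB : solStepB n (st, kB) c =
            (st, (PySem.List.pyRange 0 x 1).foldl (fun kk _ => skipUp st (kk - 1)) kB) := by
          simp only [solStepB]
          rw [if_pos h1, hof]
          simp only [Option.getD_some]
        rw [hstepA, hch.1]; simp only [hstepB, hch.2]
        exact ih ans linked stA k' st k'
          ⟨rfl, hrel.hnd, hrel.hbounds, hrel.hans, hrel.hstk, hrel.hdead, hrel.halive⟩ hV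
    | D x =>
      simp only [hop] at hV
      cases hstep : pvDn? n st x.toNat kB with
      | none => rw [hstep] at hV; cases hV
      | some k' =>
        rw [hstep] at hV
        obtain ⟨h1, h2, hof⟩ := pvOp_D hop
        simp only [pvP0, pvParts] at h1 h2
        simp only [pvP1, pvParts] at hof
        have hlen : (PySem.List.pyRange 0 x 1).length = x.toNat := by
          rw [PySem.List.length_pyRange_one]; omega
        have hch := pvChainD n st linked hrel.hbounds hrel.halive (PySem.List.pyRange 0 x 1) kB k'
          (by rw [hlen]; exact hstep)
        have hstepA : solStepA n (ans, linked, stA, kA) c =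
            (ans, linked, stA,
             (PySem.List.pyRange 0 x 1).foldl (fun kk _ => (linked.getD kk (0,0)).2) kB) := by
          simp only [solStepA]
          rw [if_neg h1, if_pos h2, hof, hrel.hk]
          simp only [Option.getD_some]
        have hstepB : solStepB n (st, kB) c =
            (st, (PySem.List.pyRange 0 x 1).foldl (fun kk _ => skipDn st (kk + 1)) kB) := by
          simp only [solStepB]
          rw [if_neg h1, if_pos h2, hof]
          simp only [Option.getD_some]
        rw [hstepA, hch.1]; simp only [hstepB, hch.2]
        exact ih ans linked stA k' st k'
          ⟨rfl, hrel.hnd, hrel.hbounds, hrel.hans, hrel.hstk, hrel.hdead, hrel.halive⟩ hV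
    | C =>
      simp only [hop] at hV
      by_cases hok : 1 ≤ kB ∧ kB ≤ n ∧ kB ∉ st
      · rw [if_pos hok] at hV
        obtain ⟨hk1, hk2, hkal⟩ := hok
        rw [pvPrevAlive_eq st (kB - 1) (by omega) (fun m hm => (hrel.hbounds m hm).1),
          pvNextAlive_eq n st (kB + 1) (by omega) (fun m hm => (hrel.hbounds m hm).2)] at hV
        by_cases hend : skipUp st (kB - 1) = 0 ∧ skipDn st (kB + 1) = n + 1
        · rw [if_pos hend] at hV; cases hV
        rw [if_neg hend] at hV
        obtain ⟨h1, h2, h3⟩ := pvOp_C hop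
        simp only [pvP0, pvParts] at h1 h2 h3
        have hnd := hrel.hnd
        set up := skipUp st (kB - 1) with hup
        set dn := skipDn st (kB + 1) with hdn
        have hups := skipUp_spec st (kB - 1); rw [← hup] at hups
        have hdns := skipDn_spec st (kB + 1); rw [← hdn] at hdns
        have hkd : linked.getD kB (0,0) = (up, dn) :=
          hrel.halive kB hk1 hk2 hkal
        have hd2 : 2 ≤ dn := by have := hdns.1; omega
        have hstepA : solStepA n (ans, linked, stA, kA) c =
            (PySem.List.pySetD ans (kB - 1) "X",
             (if up = 0 then linked.modify dn (0,0) (fun p => (up, p.2))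
              else if dn = n + 1 then linked.modify up (0,0) (fun p => (p.1, dn))
              else (linked.modify up (0,0) (fun p => (p.1, dn))).modify dn (0,0) (fun p => (up, p.2))),
             stA ++ [(up, dn, kB)], if dn = n + 1 then up else dn) := by
          simp only [solStepA]
          rw [if_neg h1, if_neg h2, if_pos h3, hrel.hk, hkd]
        have hstepB : solStepB n (st, kB) c = (st ++ [kB], if dn = n + 1 then up else dn) := by
          simp only [solStepB]
          rw [if_neg h1, if_neg h2, if_pos h3, ← hdn, ← hup]
        rw [hstepA]; simp only [hstepB]
        have hnd' : (st ++ [kB]).Nodup := by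
          rw [List.nodup_append]
          refine ⟨hnd, List.nodup_singleton _, ?_⟩
          intro a ha b hb
          rw [List.mem_singleton] at hb
          subst hb
          exact fun hc => hkal (hc ▸ ha)
        have hstk' : stA ++ [(up, dn, kB)] = pvRecon [] (st ++ [kB]) := by
          rw [pvRecon_append st [] kB]
          simp only [List.nil_append]
          rw [hrel.hstk, ← hup, ← hdn]
        have hAgree := pvAgree linked n up dn up dn hd2
        have hdead' : ∀ t ∈ stA ++ [(up, dn, kB)],
            (if up = 0 then linked.modify dn (0,0) (fun p => (up, p.2))
             else if dn = n + 1 then linked.modify up (0,0) (fun p => (p.1, dn))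
             else (linked.modify up (0,0) (fun p => (p.1, dn))).modify dn (0,0) (fun p => (up, p.2))).getD t.2.2 (0,0)
              = (t.1, t.2.1) := by
          intro t ht
          rcases List.mem_append.mp ht with htold | htnew
          · have htm : t.2.2 ∈ st := by
              have := pvRecon_mem st [] t
              rw [← hrel.hstk] at this
              exact this htold
            have htb := hrel.hbounds t.2.2 htm
            have hne1 : ¬ t.2.2 = up := fun e => hups.2.1 (e ▸ htm)
            have hne2 : ¬ t.2.2 = dn := fun e => hdns.2.1 (e ▸ htm)
            rw [hAgree t.2.2 htb.1 htb.2]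
            rw [PySem.Dict.getD_modify, if_neg hne2, PySem.Dict.getD_modify, if_neg hne1]
            exact hrel.hdead t htold
          · rw [List.mem_singleton] at htnew
            subst htnew
            rw [hAgree kB hk1 hk2]
            rw [PySem.Dict.getD_modify, if_neg (by have := hdns.1; omega : ¬ (kB : Int) = dn),
              PySem.Dict.getD_modify, if_neg (by have := hups.1; omega : ¬ (kB : Int) = up)]
            exact hkd
        have halive2 := pvDictC n st linked kB hk1 hk2 hrel.halive
        have halive' : ∀ i : Int, 1 ≤ i → i ≤ n → i ∉ st ++ [kB] →
            (if up = 0 then linked.modify dn (0,0) (fun p => (up, p.2))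
             else if dn = n + 1 then linked.modify up (0,0) (fun p => (p.1, dn))
             else (linked.modify up (0,0) (fun p => (p.1, dn))).modify dn (0,0) (fun p => (up, p.2))).getD i (0,0)
              = (skipUp (st ++ [kB]) (i-1), skipDn (st ++ [kB]) (i+1)) := by
          intro i hi1 hi2 hi3
          rw [hAgree i hi1 hi2]
          have := halive2 i hi1 hi2 hi3
          rw [← hup, ← hdn] at this
          exact this
        refine ih _ _ _ _ _ _
          ⟨rfl, hnd', ?_, ?_, hstk'.symm ▸ rfl, hdead', halive'⟩ hV
        · intro m hm
          rcases List.mem_append.mp hm with hm | hm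
          · exact hrel.hbounds m hm
          · rw [List.mem_singleton] at hm
            subst hm
            exact ⟨hk1, hk2⟩
        · rw [hrel.hans]
          exact (pvRender_C n kB st hk1 hk2 hkal).symm ▸ rfl
      · rw [if_neg hok] at hV; cases hV
    | Z =>
      simp only [hop] at hV
      rcases List.eq_nil_or_concat st with rfl | ⟨bs, m, hst⟩
      · simp [List.isEmpty_nil] at hV
      rw [List.concat_eq_append] at hst
      subst hst
      have hne : ((bs ++ [m]).isEmpty) = false := by simp
      rw [hne] at hV
      simp only [List.dropLast_concat] at hV
      obtain ⟨h1, h2, h3, h4⟩ := pvOp_Z hop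
      simp only [pvP0, pvParts] at h1 h2 h3 h4
      set u := skipUp bs (m - 1) with hu
      set d := skipDn bs (m + 1) with hd
      have hstk : stA = pvRecon [] bs ++ [(u, d, m)] := by
        rw [hrel.hstk, pvRecon_append bs [] m]
        simp only [List.nil_append]
        rw [← hu, ← hd]
      have htr : (u, d, m) ∈ stA := by
        rw [hstk]; exact List.mem_append_right _ (List.mem_singleton_self _)
      have hgetm : linked.getD m (0,0) = (u, d) := hrel.hdead (u, d, m) htr
      have hmbs : m ∉ bs := by
        have h := hrel.hnd
        rw [List.nodup_append] at h
        intro hc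
        exact (h.2.2 m hc m (List.mem_singleton_self m)) rfl
      have hmb := hrel.hbounds m (List.mem_append_right _ (List.mem_singleton_self m))
      have hus := skipUp_spec bs (m - 1); rw [← hu] at hus
      have hds := skipDn_spec bs (m + 1); rw [← hd] at hds
      have hd2 : 2 ≤ d := by have := hds.1; have := hmb.1; omega
      have hstepA : solStepA n (ans, linked, stA, kA) c =
          (PySem.List.pySetD ans (m - 1) "O",
           (if u = 0 then linked.modify d (0,0) (fun p => (m, p.2))
            else if d = n + 1 then linked.modify u (0,0) (fun p => (p.1, m))
            else (linked.modify u (0,0) (fun p => (p.1, m))).modify d (0,0) (fun p => (m, p.2))),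
           pvRecon [] bs, kA) := by
        simp only [solStepA]
        rw [if_neg h1, if_neg h2, if_neg h3, if_pos h4, hstk]
        rw [PySem.List.pyGetD_neg_one_append_singleton]
        simp only [List.dropLast_concat]
      have hstepB : solStepB n (bs ++ [m], kB) c = (bs, kB) := by
        simp only [solStepB]
        rw [if_neg h1, if_neg h2, if_neg h3, if_pos h4]
        simp only [List.dropLast_concat]
      rw [hstepA]; simp only [hstepB]
      have hAgree := pvAgree linked n u d m m hd2
      have halive'' := pvDictZ n bs linked m hmbs hmb.1 hmb.2 hrel.halive hgetm
      have halive' : ∀ i : Int, 1 ≤ i → i ≤ n → i ∉ bs →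
          (if u = 0 then linked.modify d (0,0) (fun p => (m, p.2))
           else if d = n + 1 then linked.modify u (0,0) (fun p => (p.1, m))
           else (linked.modify u (0,0) (fun p => (p.1, m))).modify d (0,0) (fun p => (m, p.2))).getD i (0,0)
            = (skipUp bs (i-1), skipDn bs (i+1)) := by
        intro i hi1 hi2 hi3
        rw [hAgree i hi1 hi2]
        have := halive'' i hi1 hi2 hi3
        rw [← hu, ← hd] at this
        exact this
      have hdead' : ∀ t ∈ pvRecon [] bs,
          (if u = 0 then linked.modify d (0,0) (fun p => (m, p.2))
           else if d = n + 1 then linked.modify u (0,0) (fun p => (p.1, m))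
           else (linked.modify u (0,0) (fun p => (p.1, m))).modify d (0,0) (fun p => (m, p.2))).getD t.2.2 (0,0)
            = (t.1, t.2.1) := by
        intro t ht
        have htm : t.2.2 ∈ bs := pvRecon_mem bs [] t ht
        have htb := hrel.hbounds t.2.2 (List.mem_append_left _ htm)
        have hne1 : ¬ t.2.2 = u := fun e => hus.2.1 (e ▸ htm)
        have hne2 : ¬ t.2.2 = d := fun e => hds.2.1 (e ▸ htm)
        rw [hAgree t.2.2 htb.1 htb.2]
        rw [PySem.Dict.getD_modify, if_neg hne2, PySem.Dict.getD_modify, if_neg hne1]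
        exact hrel.hdead t (by rw [hstk]; exact List.mem_append_left _ ht)
      refine ih _ _ _ _ _ _
        ⟨hrel.hk, (List.nodup_append.mp hrel.hnd).1, ?_, ?_, rfl, hdead', halive'⟩ hV
      · intro x hx
        exact hrel.hbounds x (List.mem_append_left _ hx)
      · rw [hrel.hans]
        exact pvRender_Z n m bs hmb.1 hmb.2 hmbs

-- ===== VERDICT (by name: the statement is the Claim_ definition above) =====
theorem solution_spec : Claim_equal_solution := by
  intro n k cmds hdom hpre
  unfold Spec_solution
  have hrel : PvRel n (PySem.List.pyRepeat ["O"] n)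
      ((PySem.List.pyRange 1 (n + 1) 1).foldl (fun d i => d.insert i (i - 1, i + 1)) PySem.Dict.empty)
      [] (k + 1) [] (k + 1) := by
    refine ⟨rfl, List.nodup_nil, by simp, pvRender_empty n, rfl, by simp, ?_⟩
    intro i h1 h2 _
    rw [pvInit_getD n i h1 h2, skipUp_not_mem (by simp), skipDn_not_mem (by simp)]
  have hmain := pvMain cmds n _ _ _ _ _ _ hrel hpre
  simp only [solution, solution_alt]
  exact congrArg (PySem.Str.join "") hmain
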